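-- pv_equiv track=rewrite | github.com/jmy315/time2code | order_a_list/main.py | order_a_list
-- ===== SOURCE A (Python) =====
-- def order_a_list(list):
--     dic = dict()
--     for i in list:
--         letter = i[0]
--         num = int(i[1:])
--         if letter not in dic:
--             dic[letter] = []
--         dic[letter].append(num)
--     all_stuff = sorted(dic.items(), key=lambda i:i[0])
--     new_list = []
--     for i in all_stuff:
--         for j in sorted(i[1]):
--             new_list.append(i[0] + str(j))
--     return(new_list)
-- ===== SOURCE B (Python) =====
-- def order_a_list(list):
--     keyed = sorted(list, key=lambda s: (s[0], int(s[1:])))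
--     return [s[0] + str(int(s[1:])) for s in keyed]
-- ===== Notes on version B (the rewrite author's own statement) =====
-- stated objective: simpler
-- what changed: Replaces A's group-into-dict-then-sort-each-group-and-flatten structure with a single stable sort of the whole list under the composite key (first char, parsed int) followed by one normalizing map.
import Mathlib
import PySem

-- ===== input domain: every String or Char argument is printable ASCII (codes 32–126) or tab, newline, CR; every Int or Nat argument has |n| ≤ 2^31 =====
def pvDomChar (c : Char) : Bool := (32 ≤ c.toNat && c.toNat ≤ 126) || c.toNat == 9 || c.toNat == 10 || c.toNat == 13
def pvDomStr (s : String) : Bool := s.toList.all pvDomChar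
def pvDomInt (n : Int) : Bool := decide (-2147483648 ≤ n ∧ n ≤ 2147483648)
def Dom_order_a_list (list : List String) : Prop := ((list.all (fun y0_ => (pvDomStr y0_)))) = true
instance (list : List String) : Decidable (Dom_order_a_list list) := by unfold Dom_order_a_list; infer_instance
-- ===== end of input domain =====

-- B replaces A's dict-grouping + per-group sorts by ONE stable sort under the composite key (first char, parsed int) and a normalizing map (objective: simpler).

-- ===== PORT A =====
-- A's dict maps the first character (Python's 1-char string i[0], modelled as Char) to the list of parsed suffixes.
def order_a_list (list : List String) : List String :=
  let dic : PySem.Dict Char (List Int) := list.foldl (fun d i =>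
      let letter : Char := (PySem.List.pyGet? i.toList 0).getD ' '       -- i[0]; Pre_ excludes the IndexError input ""
      let num : Int := (PySem.Int.ofChars? (PySem.List.slice i.toList (some 1) none)).getD 0  -- int(i[1:]); Pre_ excludes ValueError
      let d := if d.contains letter then d else d.insert letter []
      d.modify letter [] (fun v => v ++ [num])) PySem.Dict.empty
  let all_stuff := PySem.List.sorted dic.items (fun i => i.1) false
  all_stuff.foldl (fun new_list i =>
    (PySem.List.sorted i.2 (fun j => j) false).foldl
      (fun new_list j => new_list ++ [String.ofList (i.1 :: PySem.Int.toChars j)]) new_list) []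

-- ===== PORT B =====
def pvKeyB (s : String) : Char × Int :=
  ((PySem.List.pyGet? s.toList 0).getD ' ',
   (PySem.Int.ofChars? (PySem.List.slice s.toList (some 1) none)).getD 0)

def order_a_list_alt (list : List String) : List String :=
  let keyed := PySem.List.sorted list (fun s => (toLex (pvKeyB s) : Lex (Char × Int))) false
  keyed.map (fun s => String.ofList ((pvKeyB s).1 :: PySem.Int.toChars (pvKeyB s).2))

-- ===== PRECONDITION & SPEC =====
-- Pre_ excludes exactly the inputs where Python A raises: an empty token (IndexError on i[0])
-- or a suffix i[1:] that int() rejects (ValueError).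
def Pre_order_a_list (list : List String) : Prop :=
  ∀ s ∈ list, s.toList ≠ [] ∧ (PySem.Int.ofChars? (PySem.List.slice s.toList (some 1) none)).isSome = true
instance (list : List String) : Decidable (Pre_order_a_list list) := by unfold Pre_order_a_list; infer_instance

def pvWitness_order_a_list : List String := ["a2", "b1", "a10", "a02"]

def Spec_order_a_list (list : List String) (out : List String) : Prop := out = order_a_list_alt list
instance (list : List String) (out : List String) : Decidable (Spec_order_a_list list out) := by unfold Spec_order_a_list; infer_instance

-- ===== CLAIM (what is proved, stated in full; the proofs are below) =====
def Claim_equal_order_a_list : Prop := ∀ (list : List String), Dom_order_a_list list → Pre_order_a_list list → Spec_order_a_list list (order_a_list list)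

-- ===== LEMMAS AND PROOFS =====

-- proof-side abbreviations
def pvGrp (list : List String) (c : Char) : List Int :=
  (list.filter (fun i => (pvKeyB i).1 == c)).map (fun i => (pvKeyB i).2)
def pvLset (list : List String) : List Char := PySem.Set.ofList (list.map (fun i => (pvKeyB i).1))
def pvSortedL (list : List String) : List Char := PySem.List.sorted (pvLset list) (fun x => x) false
def pvMk (p : Char × Int) : String := String.ofList (p.1 :: PySem.Int.toChars p.2)
def pvAkeys (list : List String) : List (Char × Int) :=
  (pvSortedL list).flatMap (fun c => (PySem.List.sorted (pvGrp list c) (fun j => j) false).map (fun j => (c, j)))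
def pvBkeys (list : List String) : List (Char × Int) :=
  (PySem.List.sorted list (fun s => (toLex (pvKeyB s) : Lex (Char × Int))) false).map pvKeyB

-- the insert-if-absent-then-append step is a plain modify
theorem pv_step_eq (d : PySem.Dict Char (List Int)) (c : Char) (n : Int) :
    (if d.contains c then d else d.insert c []).modify c [] (fun v => v ++ [n])
      = d.modify c [] (fun v => v ++ [n]) := by
  by_cases h : d.contains c = true
  · simp [h]
  · have h' : d.contains c = false := by simpa using h
    simp only [h', Bool.false_eq_true, if_false, PySem.Dict.modify]
    rw [PySem.Dict.getD_insert_self, PySem.Dict.insert_insert_self,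
        PySem.Dict.getD_of_not_contains _ _ h']

def pvDic (list : List String) : PySem.Dict Char (List Int) :=
  (list.map (fun i => ((pvKeyB i).1, (pvKeyB i).2))).foldl
    (fun d p => d.modify p.1 [] (fun v => v ++ [p.2])) PySem.Dict.empty

theorem pv_dic_eq (list : List String) :
    (list.foldl (fun d i =>
      let letter : Char := (PySem.List.pyGet? i.toList 0).getD ' '
      let num : Int := (PySem.Int.ofChars? (PySem.List.slice i.toList (some 1) none)).getD 0
      let d := if d.contains letter then d else d.insert letter []
      d.modify letter [] (fun v => v ++ [num])) PySem.Dict.empty) = pvDic list := by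
  unfold pvDic
  rw [List.foldl_map]
  exact PySem.List.foldl_congr_mem _ _ _ _ (fun acc x _ => pv_step_eq acc _ _)

theorem pv_keys_dic (list : List String) : (pvDic list).keys = pvLset list := by
  unfold pvDic pvLset
  have h := PySem.Dict.keys_foldl_modify_key (ν := List Int)
    (list.map (fun i => ((pvKeyB i).1, (pvKeyB i).2))) (fun p => p.1) []
    (fun _ p => fun v => v ++ [p.2]) PySem.Dict.empty
  refine h.trans ?_
  rw [PySem.Dict.keys_empty, PySem.Set.update_nil_left, List.map_map]
  simp [Function.comp_def]

theorem pv_nodup_keys_dic (list : List String) : (pvDic list).keys.Nodup := by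
  unfold pvDic
  exact PySem.Dict.nodup_keys_foldl_modify_key (ν := List Int)
    (list.map (fun i => ((pvKeyB i).1, (pvKeyB i).2))) (fun p => p.1) []
    (fun _ p => fun v => v ++ [p.2]) PySem.Dict.empty PySem.Dict.nodup_keys_empty

theorem pv_getD_dic (list : List String) (c : Char) : (pvDic list).getD c [] = pvGrp list c := by
  unfold pvDic pvGrp
  rw [PySem.Dict.getD_foldl_modify_append, List.filter_map, List.map_map]
  simp [PySem.Dict.getD_empty, Function.comp_def]

theorem pv_items_dic (list : List String) :
    (pvDic list).items = (pvLset list).map (fun c => (c, pvGrp list c)) := by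
  rw [PySem.Dict.items_eq_map_keys _ (pv_nodup_keys_dic list) [], pv_keys_dic]
  exact List.map_congr_left (fun c _ => by rw [pv_getD_dic])

theorem pv_sorted_items (list : List String) :
    PySem.List.sorted (pvDic list).items (fun i => i.1) false
      = (pvSortedL list).map (fun c => (c, pvGrp list c)) := by
  apply PySem.List.sorted_eq_of_perm_of_pairwise_lt
  · rw [pv_items_dic]
    exact (PySem.List.sorted_perm _ _ _).map _
  · rw [List.pairwise_map]
    exact PySem.List.sorted_ofList_pairwise_lt _

theorem pv_A_eq_map (list : List String) : order_a_list list = (pvAkeys list).map pvMk := by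
  unfold order_a_list
  dsimp only
  rw [pv_dic_eq, pv_sorted_items]
  simp only [PySem.List.foldl_append_singleton_eq_map, PySem.List.foldl_append_eq_flatMap,
    List.nil_append, List.flatMap_map]
  unfold pvAkeys pvMk
  rw [List.map_flatMap]
  simp [List.map_map, Function.comp_def]

theorem pv_B_eq_map (list : List String) : order_a_list_alt list = (pvBkeys list).map pvMk := by
  unfold order_a_list_alt pvBkeys pvMk
  dsimp only
  rw [List.map_map]
  simp [Function.comp_def]

-- grouping a list by distinct keys is a permutation of it
theorem pv_group_perm (K : List Char) (xs : List String) (hnd : K.Nodup)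
    (hcov : ∀ x ∈ xs, (pvKeyB x).1 ∈ K) :
    (K.flatMap (fun c => xs.filter (fun i => (pvKeyB i).1 == c))).Perm xs := by
  induction K generalizing xs with
  | nil =>
    have hx : xs = [] := by
      cases xs with
      | nil => rfl
      | cons a t => exact absurd (hcov a List.mem_cons_self) List.not_mem_nil
    simp [hx]
  | cons c K' ih =>
    have hc : c ∉ K' := (List.nodup_cons.mp hnd).1
    have hnd' : K'.Nodup := (List.nodup_cons.mp hnd).2
    rw [List.flatMap_cons]
    have hblocks : ∀ c' ∈ K', xs.filter (fun i => (pvKeyB i).1 == c')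
        = (xs.filter (fun i => !((pvKeyB i).1 == c))).filter (fun i => (pvKeyB i).1 == c') := by
      intro c' hc'
      have hne : c' ≠ c := fun h => hc (h ▸ hc')
      rw [List.filter_filter]
      apply List.filter_congr
      intro i _
      by_cases h : (pvKeyB i).1 = c'
      · simp [h, hne]
      · simp [h]
    have hfl : K'.flatMap (fun c' => xs.filter (fun i => (pvKeyB i).1 == c'))
        = K'.flatMap (fun c' => (xs.filter (fun i => !((pvKeyB i).1 == c))).filter
            (fun i => (pvKeyB i).1 == c')) := by
      simp only [List.flatMap]
      exact congrArg List.flatten (List.map_congr_left hblocks)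
    rw [hfl]
    have hcov' : ∀ x ∈ xs.filter (fun i => !((pvKeyB i).1 == c)), (pvKeyB x).1 ∈ K' := by
      intro x hx
      obtain ⟨hx1, hx2⟩ := List.mem_filter.mp hx
      rcases List.mem_cons.mp (hcov x hx1) with h | h
      · exact absurd h (by simpa using hx2)
      · exact h
    exact ((ih _ hnd' hcov').append_left _).trans (List.filter_append_perm _ xs)

theorem pv_Akeys_perm (list : List String) : (pvAkeys list).Perm (list.map pvKeyB) := by
  unfold pvAkeys
  have h1 : (pvSortedL list).flatMap
        (fun c => (PySem.List.sorted (pvGrp list c) (fun j => j) false).map (fun j => (c, j)))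
      |>.Perm ((pvSortedL list).flatMap (fun c => (pvGrp list c).map (fun j => (c, j)))) :=
    List.Perm.flatMap (List.Perm.refl _) (fun c _ => (PySem.List.sorted_perm _ _ _).map _)
  have h2 : (fun c => (pvGrp list c).map (fun j => (c, j)))
      = (fun c => (list.filter (fun i => (pvKeyB i).1 == c)).map pvKeyB) := by
    funext c
    unfold pvGrp
    rw [List.map_map]
    apply List.map_congr_left
    intro i hi
    have : (pvKeyB i).1 = c := by simpa using (List.mem_filter.mp hi).2
    simp [← this]
  have h3 : ((pvSortedL list).flatMap (fun c => (list.filter (fun i => (pvKeyB i).1 == c)).map pvKeyB))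
      = ((pvSortedL list).flatMap (fun c => list.filter (fun i => (pvKeyB i).1 == c))).map pvKeyB :=
    (List.map_flatMap).symm
  have h4 : ((pvSortedL list).flatMap (fun c => list.filter (fun i => (pvKeyB i).1 == c))).Perm
      ((pvLset list).flatMap (fun c => list.filter (fun i => (pvKeyB i).1 == c))) :=
    List.Perm.flatMap (PySem.List.sorted_perm _ _ _) (fun _ _ => List.Perm.refl _)
  have h5 := pv_group_perm (pvLset list) list (PySem.Set.nodup_ofList _)
    (fun x hx => by unfold pvLset; rw [PySem.Set.mem_ofList]; exact List.mem_map_of_mem hx)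
  exact h1.trans (by rw [h2, h3]; exact (h4.trans h5).map pvKeyB)

theorem pv_Bkeys_perm (list : List String) : (pvBkeys list).Perm (list.map pvKeyB) :=
  (PySem.List.sorted_perm _ _ _).map _

theorem pv_Akeys_pairwise (list : List String) :
    (pvAkeys list).Pairwise (fun p q => (toLex p : Lex (Char × Int)) ≤ toLex q) := by
  unfold pvAkeys
  have hK : (pvSortedL list).Pairwise (· < ·) := PySem.List.sorted_ofList_pairwise_lt _
  generalize (pvSortedL list) = K at hK ⊢
  induction K with
  | nil => simp
  | cons c K' ih =>
    rw [List.flatMap_cons]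
    rw [List.pairwise_append]
    refine ⟨?_, ih hK.tail, ?_⟩
    · rw [List.pairwise_map]
      refine (PySem.List.sorted_pairwise (pvGrp list c) (fun j => j)).imp ?_
      intro a b hab
      rw [Prod.Lex.toLex_le_toLex]
      exact Or.inr ⟨rfl, hab⟩
    · intro p hp q hq
      obtain ⟨j, _, rfl⟩ := List.mem_map.mp hp
      obtain ⟨c', hc', hq'⟩ := List.mem_flatMap.mp hq
      obtain ⟨j', _, rfl⟩ := List.mem_map.mp hq'
      rw [Prod.Lex.toLex_le_toLex]
      exact Or.inl ((List.pairwise_cons.mp hK).1 c' hc')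

theorem pv_Bkeys_pairwise (list : List String) :
    (pvBkeys list).Pairwise (fun p q => (toLex p : Lex (Char × Int)) ≤ toLex q) := by
  unfold pvBkeys
  rw [List.pairwise_map]
  exact PySem.List.sorted_pairwise list (fun s => (toLex (pvKeyB s) : Lex (Char × Int)))

theorem pv_keys_eq (list : List String) : pvAkeys list = pvBkeys list := by
  refine PySem.List.eq_of_perm_of_pairwise_le_of_injective
    (fun p : Char × Int => (toLex p : Lex (Char × Int))) (fun a b h => h)
    ((pv_Akeys_perm list).trans (pv_Bkeys_perm list).symm)
    (pv_Akeys_pairwise list) (pv_Bkeys_pairwise list)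

-- ===== VERDICT (by name: the statement is the Claim_ definition above) =====
theorem order_a_list_spec : Claim_equal_order_a_list := by
  intro list _ _
  show order_a_list list = order_a_list_alt list
  rw [pv_A_eq_map, pv_B_eq_map, pv_keys_eq]
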